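-- pv_equiv track=rewrite | github.com/beitist/logion2 | backend/app/utils/tc_diff.py | _serialize_fragments
-- ===== SOURCE A (Python) =====
-- def _serialize_fragments(fragments: list) -> str:
--     """
--     Convert fragment list to TipTap HTML.
--     Nesting order: insert (inner) then delete (outer).
--     """
--     parts = []
--     for text, marks in fragments:
--         if not text:
--             continue
--         html = text
--         for mtype, attrs in marks:
--             if mtype == "insert":
--                 html = f"<insert {attrs}>{html}</insert>"
--         for mtype, attrs in marks:
--             if mtype == "delete":
--                 html = f"<delete {attrs}>{html}</delete>"
--         parts.append(html)
--     return "".join(parts)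
-- ===== SOURCE B (Python) =====
-- def _serialize_fragments(fragments: list) -> str:
--     """
--     Convert fragment list to TipTap HTML.
--     Instead of repeatedly re-wrapping the text, build the opening prefix and
--     closing suffix once per fragment: deletes outermost (later marks outer),
--     inserts inside, text innermost.
--     """
--     parts = []
--     for text, marks in fragments:
--         if not text:
--             continue
--         ins = [attrs for mtype, attrs in marks if mtype == "insert"]
--         dels = [attrs for mtype, attrs in marks if mtype == "delete"]
--         prefix = "".join(f"<delete {a}>" for a in reversed(dels)) + \
--                  "".join(f"<insert {a}>" for a in reversed(ins))
--         suffix = "</insert>" * len(ins) + "</delete>" * len(dels)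
--         parts.append(prefix + text + suffix)
--     return "".join(parts)
-- ===== Notes on version B (the rewrite author's own statement) =====
-- stated objective: alternative
-- what changed: B never re-wraps the accumulated string: it partitions each fragment's marks into insert and delete attribute lists, builds the opening prefix (reversed deletes then reversed inserts) and the closing suffix by tag repetition once, and emits prefix + text + suffix.
import Mathlib
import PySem

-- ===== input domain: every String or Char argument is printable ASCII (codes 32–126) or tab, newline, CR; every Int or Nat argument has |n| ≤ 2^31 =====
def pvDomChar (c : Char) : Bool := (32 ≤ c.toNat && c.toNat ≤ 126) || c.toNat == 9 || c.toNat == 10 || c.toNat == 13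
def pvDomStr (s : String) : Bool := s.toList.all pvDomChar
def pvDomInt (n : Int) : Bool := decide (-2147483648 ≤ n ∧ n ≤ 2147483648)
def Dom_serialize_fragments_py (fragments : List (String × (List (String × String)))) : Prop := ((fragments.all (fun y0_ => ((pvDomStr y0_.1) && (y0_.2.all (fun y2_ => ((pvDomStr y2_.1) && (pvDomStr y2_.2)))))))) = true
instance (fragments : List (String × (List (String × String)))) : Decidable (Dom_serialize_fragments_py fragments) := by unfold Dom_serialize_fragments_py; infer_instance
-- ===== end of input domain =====

-- B builds each fragment's opening prefix and closing suffix once instead of re-wrapping the string per mark; return value only, no mutation.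

-- ===== PORT A =====
-- first inner loop: wrap in <insert> tags, later marks outside
def pvWrapIns (marks : List (String × String)) (html : String) : String :=
  marks.foldl (fun html m => if m.1 == "insert" then "<insert " ++ m.2 ++ ">" ++ html ++ "</insert>" else html) html

-- second inner loop: wrap in <delete> tags, later marks outside
def pvWrapDel (marks : List (String × String)) (html : String) : String :=
  marks.foldl (fun html m => if m.1 == "delete" then "<delete " ++ m.2 ++ ">" ++ html ++ "</delete>" else html) html

def serialize_fragments_py (fragments : List (String × (List (String × String)))) : String :=
  String.join (fragments.foldl
    (fun parts p => if p.1 == "" then parts else parts ++ [pvWrapDel p.2 (pvWrapIns p.2 p.1)]) [])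

-- ===== PORT B =====
-- one fragment: prefix (reversed deletes, then reversed inserts) + text + suffix (repeated close tags)
def pvFragPart (text : String) (marks : List (String × String)) : String :=
  let ins := (marks.filter (fun m => m.1 == "insert")).map Prod.snd
  let dels := (marks.filter (fun m => m.1 == "delete")).map Prod.snd
  String.join (dels.reverse.map (fun a => "<delete " ++ a ++ ">")) ++
  String.join (ins.reverse.map (fun a => "<insert " ++ a ++ ">")) ++
  text ++
  String.join (List.replicate ins.length "</insert>") ++
  String.join (List.replicate dels.length "</delete>")

def serialize_fragments_py_alt (fragments : List (String × (List (String × String)))) : String :=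
  String.join (fragments.foldl
    (fun parts p => if p.1 == "" then parts else parts ++ [pvFragPart p.1 p.2]) [])

-- ===== PRECONDITION & SPEC =====
def Spec_serialize_fragments_py (fragments : List (String × (List (String × String)))) (out : String) : Prop := out = serialize_fragments_py_alt fragments
instance (fragments : List (String × (List (String × String)))) (out : String) : Decidable (Spec_serialize_fragments_py fragments out) := by unfold Spec_serialize_fragments_py; infer_instance

-- ===== CLAIM (what is proved, stated in full; the proofs are below) =====
def Claim_equal_serialize_fragments_py : Prop := ∀ (fragments : List (String × (List (String × String)))), Dom_serialize_fragments_py fragments → Spec_serialize_fragments_py fragments (serialize_fragments_py fragments)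

-- ===== LEMMAS AND PROOFS =====

theorem pvJoin_cons (a : String) (l : List String) : String.join (a :: l) = a ++ String.join l := by
  have h : ∀ (l : List String) (x y : String),
      l.foldl (· ++ ·) (x ++ y) = x ++ l.foldl (· ++ ·) y := by
    intro l
    induction l with
    | nil => intro x y; rfl
    | cons b t ih => intro x y; simp only [List.foldl_cons, String.append_assoc, ih]
  simp only [String.join, List.foldl_cons]
  have := h l a ""
  simpa using this

theorem pvJoin_append (l₁ l₂ : List String) :
    String.join (l₁ ++ l₂) = String.join l₁ ++ String.join l₂ := by
  induction l₁ with
  | nil => simp [String.join]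
  | cons a t ih => simp [pvJoin_cons, ih, String.append_assoc]

-- a wrap-loop equals prefix ++ h ++ suffix
theorem pvFoldl_wrap (p : String × String → Bool) (f : String → String) (cl : String)
    (marks : List (String × String)) (h : String) :
    marks.foldl (fun html m => if p m then f m.2 ++ html ++ cl else html) h
    = String.join ((((marks.filter p).map Prod.snd).reverse).map f) ++ h ++
      String.join (List.replicate ((marks.filter p).map Prod.snd).length cl) := by
  induction marks generalizing h with
  | nil => simp [String.join]
  | cons m rest ih =>
    by_cases hm : p m = true
    · simp only [List.foldl_cons, hm, if_pos, List.filter_cons_of_pos hm, List.map_cons,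
        List.reverse_cons, List.map_append, List.length_cons, List.replicate_succ,
        pvJoin_append, pvJoin_cons, ih]
      simp [String.append_assoc, String.join]
    · simp only [List.foldl_cons, hm, if_neg, Bool.false_eq_true, not_false_iff,
        List.filter_cons_of_neg hm, ih]

theorem pvFrag_eq (t : String) (marks : List (String × String)) :
    pvWrapDel marks (pvWrapIns marks t) = pvFragPart t marks := by
  unfold pvWrapDel pvWrapIns pvFragPart
  rw [pvFoldl_wrap (fun m => m.1 == "insert") (fun a => "<insert " ++ a ++ ">") "</insert>",
      pvFoldl_wrap (fun m => m.1 == "delete") (fun a => "<delete " ++ a ++ ">") "</delete>"]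
  simp [String.append_assoc]

-- ===== VERDICT (by name: the statement is the Claim_ definition above) =====
theorem serialize_fragments_py_spec : Claim_equal_serialize_fragments_py := by
  intro fragments _
  unfold Spec_serialize_fragments_py serialize_fragments_py serialize_fragments_py_alt
  congr 1
  apply List.foldl_ext
  intro acc p _
  rw [pvFrag_eq]
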